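-- pv_equiv track=rewrite | github.com/sangminsang/mahjong_yolo_project | apis/discard/logic.py | analyze_hand
-- ===== SOURCE A (Python) =====
-- from collections import Counter
--
-- def process_tile(tile: str) -> str:
--     """적도라(r5m 등)를 일반 패로 변환 (예: 'r5m' → '5m')"""
--     return tile[1:] if tile.startswith('r') else tile
--
-- def analyze_hand(hand):
--     """패를 블록 단위로 분석"""
--     # 적도라 처리된 패로 변환
--     processed_hand = [process_tile(tile) for tile in hand]
--     tile_counts = Counter(processed_hand)
--     effective_tiles = set()
--
--     # 각 패 종류별로 분석
--     for tile in set(processed_hand):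
--         if tile[-1] in ['m', 'p', 's']:
--             value = int(tile[0])
--             suit = tile[-1]
--
--             # 연속된 패 분석 최적화
--             for i in range(max(1, value-2), min(9, value+3)):
--                 if i <= 7:
--                     seq = [f"{j}{suit}" for j in range(i, i+3)]
--                     existing = sum(1 for t in seq if t in processed_hand)
--                     missing = set(seq) - set(processed_hand)
--                     if existing >= 2 and len(missing) == 1:
--                         effective_tiles.update(missing)
--
--             # 쌍패 및 커쯔 분석
--             if tile_counts[tile] == 2:
--                 effective_tiles.add(tile)
--             elif tile_counts[tile] == 1:
--                 for i in [-2, -1, 1, 2]: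
--                     new_value = value + i
--                     if 1 <= new_value <= 9:
--                         effective_tiles.add(f"{new_value}{suit}")
--
--     # 자패 처리
--     for tile in set(processed_hand):
--         if tile[-1] == 'z':
--             if tile_counts[tile] == 2:
--                 effective_tiles.add(tile)
--             elif tile_counts[tile] == 1:
--                 effective_tiles.add(tile)
--
--     return effective_tiles
-- ===== SOURCE B (Python) =====
-- from collections import Counter
--
--
-- def process_tile(tile: str) -> str:
--     return tile[1:] if tile.startswith('r') else tile
--
--
-- def analyze_hand(hand):
--     processed = [process_tile(t) for t in hand]
--     present = set(processed)
--     tile_counts = Counter(processed)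
--     result = set()
--     # pass 1: every candidate run window, suit by suit
--     for suit in 'mps':
--         for i in range(1, 8):
--             window = [f"{j}{suit}" for j in range(i, i + 3)]
--             hits = [t for t in window if t in present]
--             if len(hits) == 2:
--                 result |= set(window) - present
--     # pass 2: pairs, isolated-tile neighbours and honor tiles
--     for tile in present:
--         if tile[-1] in ('m', 'p', 's'):
--             value = int(tile[0])
--             if tile_counts[tile] == 2:
--                 result.add(tile)
--             elif tile_counts[tile] == 1:
--                 for d in (-2, -1, 1, 2):
--                     if 1 <= value + d <= 9:
--                         result.add(f"{value + d}{tile[-1]}")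
--         elif tile[-1] == 'z' and tile_counts[tile] <= 2:
--             result.add(tile)
--     return result
-- ===== Notes on version B (the rewrite author's own statement) =====
-- stated objective: simpler
-- what changed: A scans, for every distinct suited tile, the run windows near that tile (a nested per-tile window loop) and handles honor tiles in a second per-tile loop; B instead enumerates all 21 candidate run windows directly (7 window starts per suit) in one pass and then handles pairs, isolated-tile neighbours and honor tiles in a single pass over the distinct tiles.
import Mathlib
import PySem

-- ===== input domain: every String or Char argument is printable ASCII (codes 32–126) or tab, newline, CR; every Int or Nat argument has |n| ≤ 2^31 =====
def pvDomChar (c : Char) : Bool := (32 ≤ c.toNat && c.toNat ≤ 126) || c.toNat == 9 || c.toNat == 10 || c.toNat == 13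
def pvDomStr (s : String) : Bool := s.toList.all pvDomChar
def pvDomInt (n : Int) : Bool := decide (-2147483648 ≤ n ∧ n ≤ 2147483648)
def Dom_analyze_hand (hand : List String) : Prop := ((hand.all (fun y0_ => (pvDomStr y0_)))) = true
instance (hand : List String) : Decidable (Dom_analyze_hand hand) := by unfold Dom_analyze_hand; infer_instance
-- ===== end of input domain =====

set_option maxHeartbeats 1000000


-- B restructures A's per-tile nested window scan into a direct pass over all run windows per suit
-- plus one pass over the distinct tiles; same resulting set. Python returns an (unordered) set;
-- both ports return its distinct elements in sorted order.

-- ===== PORT A =====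

-- process_tile: 'r5m' → '5m'
def process_tile (tile : String) : String :=
  if PySem.Str.startswith tile "r" then PySem.Str.slice tile (some 1) none else tile

-- f"{j}{suit}" (suit a single char, as Python's tile[-1])
def mkTileStr (j : Int) (c : Char) : String := String.ofList (PySem.Int.toChars j ++ [c])

def analyze_hand (hand : List String) : List String :=
  let processed := hand.map process_tile
  let tile_counts := PySem.Dict.counter processed
  let effective_tiles : PySem.Set String := PySem.Set.empty
  -- for tile in set(processed_hand): suited-tile analysis
  let effective_tiles := (PySem.Set.ofList processed).foldl (fun eff tile =>
    if (PySem.Str.pyGet? tile (-1)).getD ' ' ∈ (['m', 'p', 's'] : List Char) then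
      let value := (PySem.Int.ofChars? [(PySem.Str.pyGet? tile 0).getD ' ']).getD 0
      let suit := (PySem.Str.pyGet? tile (-1)).getD ' '
      -- run-window scan near this tile
      let eff := (PySem.List.pyRange (max 1 (value - 2)) (min 9 (value + 3)) 1).foldl (fun eff i =>
        if i ≤ 7 then
          let seq := (PySem.List.pyRange i (i + 3) 1).map (fun j => mkTileStr j suit)
          let existing := seq.foldl (fun n t => if processed.contains t then n + 1 else n) (0 : Int)
          let missing := PySem.Set.diff (PySem.Set.ofList seq) (PySem.Set.ofList processed)
          if 2 ≤ existing ∧ missing.length = 1 then PySem.Set.update eff missing else eff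
        else eff) eff
      -- pair / isolated-tile analysis
      if tile_counts.getD tile 0 = 2 then PySem.Set.add eff tile
      else if tile_counts.getD tile 0 = 1 then
        ([-2, -1, 1, 2] : List Int).foldl (fun eff d =>
          let new_value := value + d
          if 1 ≤ new_value ∧ new_value ≤ 9 then PySem.Set.add eff (mkTileStr new_value suit)
          else eff) eff
      else eff
    else eff) effective_tiles
  -- for tile in set(processed_hand): honor tiles
  let effective_tiles := (PySem.Set.ofList processed).foldl (fun eff tile =>
    if (PySem.Str.pyGet? tile (-1)).getD ' ' = 'z' then
      if tile_counts.getD tile 0 = 2 then PySem.Set.add eff tile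
      else if tile_counts.getD tile 0 = 1 then PySem.Set.add eff tile
      else eff
    else eff) effective_tiles
  -- the Python set is unordered; return its elements sorted (comparison is as a finite set)
  PySem.List.sorted effective_tiles (fun x => x) false

-- ===== PORT B =====

def analyze_hand_alt (hand : List String) : List String :=
  let processed := hand.map process_tile
  let present := PySem.Set.ofList processed
  let tile_counts := PySem.Dict.counter processed
  let result : PySem.Set String := PySem.Set.empty
  -- pass 1: every candidate run window, suit by suit
  let result := (['m', 'p', 's'] : List Char).foldl (fun res suit =>
    (PySem.List.pyRange 1 8 1).foldl (fun res i =>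
      let window := (PySem.List.pyRange i (i + 3) 1).map (fun j => mkTileStr j suit)
      let hits := window.filter (fun t => PySem.Set.contains present t)
      if hits.length = 2 then
        PySem.Set.update res (PySem.Set.diff (PySem.Set.ofList window) present)
      else res) res) result
  -- pass 2: pairs, isolated-tile neighbours and honor tiles
  let result := present.foldl (fun res tile =>
    if (PySem.Str.pyGet? tile (-1)).getD ' ' ∈ (['m', 'p', 's'] : List Char) then
      let value := (PySem.Int.ofChars? [(PySem.Str.pyGet? tile 0).getD ' ']).getD 0
      if tile_counts.getD tile 0 = 2 then PySem.Set.add res tile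
      else if tile_counts.getD tile 0 = 1 then
        ([-2, -1, 1, 2] : List Int).foldl (fun res d =>
          if 1 ≤ value + d ∧ value + d ≤ 9 then
            PySem.Set.add res (mkTileStr (value + d) ((PySem.Str.pyGet? tile (-1)).getD ' '))
          else res) res
      else res
    else if (PySem.Str.pyGet? tile (-1)).getD ' ' = 'z' ∧ tile_counts.getD tile 0 ≤ 2 then
      PySem.Set.add res tile
    else res) result
  -- the Python set is unordered; return its elements sorted (comparison is as a finite set)
  PySem.List.sorted result (fun x => x) false

-- ===== PRECONDITION & SPEC =====

-- the processed form of a tile, as Pre_ needs to inspect it (spec-level; mirrors process_tile)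
def preProc (t : String) : List Char :=
  if t.toList.head? = some 'r' then t.toList.tail else t.toList

-- Pre_ excludes exactly the inputs where Python A raises: a tile whose processed form is empty
-- (IndexError on tile[-1]) or is a suited m/p/s tile whose first character is not a digit
-- (ValueError on int(tile[0])).
def Pre_analyze_hand (hand : List String) : Prop :=
  ∀ t ∈ hand, preProc t ≠ [] ∧
    ((preProc t).getLast?.getD ' ' ∈ (['m', 'p', 's'] : List Char) →
      ('0' ≤ (preProc t).headD ' ' ∧ (preProc t).headD ' ' ≤ '9'))
instance (hand : List String) : Decidable (Pre_analyze_hand hand) := by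
  unfold Pre_analyze_hand; infer_instance

def pvWitness_analyze_hand : List String := ["1m", "2m", "r5m", "5p", "3z", "3z"]

def Spec_analyze_hand (hand : List String) (out : List String) : Prop := out = analyze_hand_alt hand
instance (hand : List String) (out : List String) : Decidable (Spec_analyze_hand hand out) := by
  unfold Spec_analyze_hand; infer_instance

-- ===== CLAIM (what is proved, stated in full; the proofs are below) =====
def Claim_equal_analyze_hand : Prop := ∀ (hand : List String), Dom_analyze_hand hand → Pre_analyze_hand hand → Spec_analyze_hand hand (analyze_hand hand)

-- ===== LEMMAS AND PROOFS =====

def pvLast (t : String) : Char := (PySem.Str.pyGet? t (-1)).getD ' '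
def pvVal (t : String) : Int := (PySem.Int.ofChars? [(PySem.Str.pyGet? t 0).getD ' ']).getD 0
def pvCnt (P : List String) (t : String) : Int := (PySem.Dict.counter P).getD t 0
def pvSeq (i : Int) (c : Char) : List String :=
  (PySem.List.pyRange i (i + 3) 1).map (fun j => mkTileStr j c)
def pvMissing (P : List String) (i : Int) (c : Char) : PySem.Set String :=
  PySem.Set.diff (PySem.Set.ofList (pvSeq i c)) (PySem.Set.ofList P)

theorem pyRange3 (i : Int) : PySem.List.pyRange i (i + 3) 1 = [i, i + 1, i + 2] := by
  rw [PySem.List.pyRange_one_cons (by omega), PySem.List.pyRange_one_cons (by omega),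
      PySem.List.pyRange_one_cons (by omega), PySem.List.pyRange_one_eq_nil (by omega)]
  simp only [List.cons.injEq, and_self, and_true, true_and]
  omega

theorem pvLast_mkTile (j : Int) (c : Char) : pvLast (mkTileStr j c) = c := by
  simp [pvLast, mkTileStr, PySem.List.pyGet?_neg_one]

theorem pvVal_mkTile (j : Int) (c : Char) (h1 : 1 ≤ j) (h9 : j ≤ 9) :
    pvVal (mkTileStr j c) = j := by
  interval_cases j <;> simp [pvVal, mkTileStr] <;> rfl

theorem mkTile_inj (j j' : Int) (c : Char) (h1 : 1 ≤ j) (h9 : j ≤ 9) (h1' : 1 ≤ j') (h9' : j' ≤ 9)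
    (h : mkTileStr j c = mkTileStr j' c) : j = j' := by
  have := congrArg pvVal h
  rwa [pvVal_mkTile _ _ h1 h9, pvVal_mkTile _ _ h1' h9'] at this

theorem pvSeq_eq (i : Int) (c : Char) :
    pvSeq i c = [mkTileStr i c, mkTileStr (i + 1) c, mkTileStr (i + 2) c] := by
  simp [pvSeq, pyRange3]

theorem pvSeq_nodup (i : Int) (c : Char) (h1 : 1 ≤ i) (h7 : i ≤ 7) : (pvSeq i c).Nodup := by
  rw [pvSeq_eq]
  have n1 : mkTileStr i c ≠ mkTileStr (i + 1) c := fun h => by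
    have := mkTile_inj _ _ _ (by omega) (by omega) (by omega) (by omega) h; omega
  have n2 : mkTileStr i c ≠ mkTileStr (i + 2) c := fun h => by
    have := mkTile_inj _ _ _ (by omega) (by omega) (by omega) (by omega) h; omega
  have n3 : mkTileStr (i + 1) c ≠ mkTileStr (i + 2) c := fun h => by
    have := mkTile_inj _ _ _ (by omega) (by omega) (by omega) (by omega) h; omega
  simp [List.nodup_cons, n1, n2, n3]

def pvExisting (P : List String) (i : Int) (c : Char) : Int :=
  (pvSeq i c).foldl (fun n t => if P.contains t then n + 1 else n) 0

def pvHits (P : List String) (i : Int) (c : Char) : Nat :=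
  ((pvSeq i c).filter (fun t => PySem.Set.contains (PySem.Set.ofList P) t)).length

theorem pvExisting_eq (P : List String) (i : Int) (c : Char) :
    pvExisting P i c = ((pvSeq i c).countP (fun t => P.contains t) : Int) := by
  rw [pvExisting, PySem.List.foldl_if_add_one, zero_add]

theorem pvHits_eq (P : List String) (i : Int) (c : Char) :
    pvHits P i c = (pvSeq i c).countP (fun t => P.contains t) := by
  rw [pvHits, ← List.countP_eq_length_filter]
  refine List.countP_congr (fun t _ => ?_)
  simp [PySem.Set.contains_iff, PySem.Set.mem_ofList, List.contains_iff_mem]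

theorem pvMissing_length (P : List String) (i : Int) (c : Char) (h1 : 1 ≤ i) (h7 : i ≤ 7) :
    (pvMissing P i c).length + (pvSeq i c).countP (fun t => P.contains t) = 3 := by
  have hnd := pvSeq_nodup i c h1 h7
  have hlen : (pvSeq i c).length = 3 := by rw [pvSeq_eq]; rfl
  have hcong : (pvSeq i c).countP (fun t => P.contains t) =
      (pvSeq i c).countP (fun t => (PySem.Set.ofList P).contains t) := by
    refine List.countP_congr (fun t _ => ?_)
    rw [Bool.eq_iff_iff]
    simp [List.contains_iff_mem, PySem.Set.mem_ofList]
  rw [hcong, pvMissing, PySem.Set.diff]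
  simp only [PySem.Set.ofList_eq_self_of_nodup _ hnd]
  rw [List.countP_eq_length_filter]
  have := List.length_eq_length_filter_add (l := pvSeq i c)
      (fun t => (PySem.Set.ofList P).contains t)
  omega

theorem cond_iff (P : List String) (i : Int) (c : Char) (h1 : 1 ≤ i) (h7 : i ≤ 7) :
    (2 ≤ pvExisting P i c ∧ (pvMissing P i c).length = 1) ↔ pvHits P i c = 2 := by
  have hm := pvMissing_length P i c h1 h7
  have hle := List.countP_le_length (p := fun t => P.contains t) (l := pvSeq i c)
  rw [pvExisting_eq, pvHits_eq]
  omega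

theorem crux (P : List String) (y : String) :
    (∃ t ∈ PySem.Set.ofList P, pvLast t ∈ (['m', 'p', 's'] : List Char) ∧
      ∃ i ∈ PySem.List.pyRange (max 1 (pvVal t - 2)) (min 9 (pvVal t + 3)) 1, i ≤ 7 ∧
        (2 ≤ pvExisting P i (pvLast t) ∧ (pvMissing P i (pvLast t)).length = 1) ∧
        y ∈ pvMissing P i (pvLast t))
    ↔ (∃ c ∈ (['m', 'p', 's'] : List Char), ∃ i ∈ PySem.List.pyRange 1 8 1,
        pvHits P i c = 2 ∧ y ∈ pvMissing P i c) := by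
  constructor
  · rintro ⟨t, ht, hc, i, hi, h7, hcond, hy⟩
    rw [PySem.List.mem_pyRange_one] at hi
    exact ⟨pvLast t, hc, i, PySem.List.mem_pyRange_one.mpr (by omega),
      (cond_iff P i _ (by omega) h7).mp hcond, hy⟩
  · rintro ⟨c, hc, i, hi, hhits, hy⟩
    rw [PySem.List.mem_pyRange_one] at hi
    have hpos : 0 < ((pvSeq i c).filter (fun t => PySem.Set.contains (PySem.Set.ofList P) t)).length := by
      rw [← pvHits]; omega
    obtain ⟨t, htseq, htP⟩ := List.length_filter_pos_iff.mp hpos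
    rw [pvSeq, List.mem_map] at htseq
    obtain ⟨j, hj, rfl⟩ := htseq
    rw [PySem.List.mem_pyRange_one] at hj
    have htP' : mkTileStr j c ∈ P := by
      have := (PySem.Set.contains_iff _ _).mp htP
      rwa [PySem.Set.mem_ofList] at this
    have hl : pvLast (mkTileStr j c) = c := pvLast_mkTile j c
    refine ⟨mkTileStr j c, by simp [PySem.Set.mem_ofList, htP'], by rw [hl]; exact hc, i, ?_,
      by omega, ?_, ?_⟩
    · rw [PySem.List.mem_pyRange_one, pvVal_mkTile _ _ (by omega) (by omega)]; omega
    · rw [hl]; exact (cond_iff P i c (by omega) (by omega)).mpr hhits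
    · rw [hl]; exact hy

theorem pv_mem_foldl_iff {β : Type} (body : PySem.Set String → β → PySem.Set String)
    (C : β → Prop) (y : String) (h : ∀ s t, y ∈ body s t ↔ y ∈ s ∨ C t) :
    ∀ (l : List β) (init : PySem.Set String),
      y ∈ l.foldl body init ↔ y ∈ init ∨ ∃ t ∈ l, C t := by
  intro l
  induction l with
  | nil => simp
  | cons x xs ih => intro init; rw [List.foldl_cons, ih, h]; simp; tauto

theorem pv_nodup_foldl {β : Type} (body : PySem.Set String → β → PySem.Set String)
    (h : ∀ s t, s.Nodup → (body s t).Nodup) :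
    ∀ (l : List β) (init : PySem.Set String), init.Nodup → (l.foldl body init).Nodup := by
  intro l
  induction l with
  | nil => simp
  | cons x xs ih => intro init hi; rw [List.foldl_cons]; exact ih _ (h _ _ hi)


def pvPairC (P : List String) (t y : String) : Prop :=
  (pvCnt P t = 2 ∧ y = t) ∨
  (¬pvCnt P t = 2 ∧ pvCnt P t = 1 ∧ ∃ d ∈ ([-2, -1, 1, 2] : List Int),
    (1 ≤ pvVal t + d ∧ pvVal t + d ≤ 9) ∧ y = mkTileStr (pvVal t + d) (pvLast t))

def pvDesc (P : List String) (y : String) : Prop :=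
  (∃ c ∈ (['m', 'p', 's'] : List Char), ∃ i ∈ PySem.List.pyRange 1 8 1,
      pvHits P i c = 2 ∧ y ∈ pvMissing P i c) ∨
  (∃ t ∈ PySem.Set.ofList P, pvLast t ∈ (['m', 'p', 's'] : List Char) ∧ pvPairC P t y) ∨
  (∃ t ∈ PySem.Set.ofList P, pvLast t = 'z' ∧ 1 ≤ pvCnt P t ∧ pvCnt P t ≤ 2 ∧ y = t)

theorem pvCnt_pos (P : List String) (t : String) (ht : t ∈ P) : 1 ≤ pvCnt P t := by
  rw [pvCnt, PySem.Dict.getD_counter]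
  have := List.count_pos_iff.mpr ht
  omega

def pvWBody (P : List String) (c : Char) : PySem.Set String → Int → PySem.Set String :=
  fun eff i =>
    if i ≤ 7 then
      if 2 ≤ pvExisting P i c ∧ (pvMissing P i c).length = 1 then
        PySem.Set.update eff (pvMissing P i c)
      else eff
    else eff

def pvNBody (P : List String) (t : String) : PySem.Set String → Int → PySem.Set String :=
  fun eff d =>
    if 1 ≤ pvVal t + d ∧ pvVal t + d ≤ 9 then
      PySem.Set.add eff (mkTileStr (pvVal t + d) (pvLast t))
    else eff

def pvABody (P : List String) : PySem.Set String → String → PySem.Set String :=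
  fun eff tile =>
    if pvLast tile ∈ (['m', 'p', 's'] : List Char) then
      let eff := (PySem.List.pyRange (max 1 (pvVal tile - 2)) (min 9 (pvVal tile + 3)) 1).foldl
        (pvWBody P (pvLast tile)) eff
      if pvCnt P tile = 2 then PySem.Set.add eff tile
      else if pvCnt P tile = 1 then
        ([-2, -1, 1, 2] : List Int).foldl (pvNBody P tile) eff
      else eff
    else eff

def pvZBody (P : List String) : PySem.Set String → String → PySem.Set String :=
  fun eff tile =>
    if pvLast tile = 'z' then
      if pvCnt P tile = 2 then PySem.Set.add eff tile
      else if pvCnt P tile = 1 then PySem.Set.add eff tile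
      else eff
    else eff

def pvBBody (P : List String) : PySem.Set String → String → PySem.Set String :=
  fun res tile =>
    if pvLast tile ∈ (['m', 'p', 's'] : List Char) then
      if pvCnt P tile = 2 then PySem.Set.add res tile
      else if pvCnt P tile = 1 then
        ([-2, -1, 1, 2] : List Int).foldl (pvNBody P tile) res
      else res
    else if pvLast tile = 'z' ∧ pvCnt P tile ≤ 2 then PySem.Set.add res tile
    else res

def pvBWBody (P : List String) (c : Char) : PySem.Set String → Int → PySem.Set String :=
  fun res i =>
    if pvHits P i c = 2 then PySem.Set.update res (pvMissing P i c) else res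

def pvEffA (P : List String) : PySem.Set String :=
  (PySem.Set.ofList P).foldl (pvZBody P) ((PySem.Set.ofList P).foldl (pvABody P) PySem.Set.empty)

def pvEffB (P : List String) : PySem.Set String :=
  (PySem.Set.ofList P).foldl (pvBBody P)
    ((['m', 'p', 's'] : List Char).foldl (fun res suit =>
        (PySem.List.pyRange 1 8 1).foldl (pvBWBody P suit) res) PySem.Set.empty)

def pvWinC (P : List String) (c : Char) (y : String) (i : Int) : Prop :=
  i ≤ 7 ∧ (2 ≤ pvExisting P i c ∧ (pvMissing P i c).length = 1) ∧ y ∈ pvMissing P i c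

theorem wstep (P : List String) (c : Char) (y : String) (s : PySem.Set String) (i : Int) :
    y ∈ pvWBody P c s i ↔ y ∈ s ∨ pvWinC P c y i := by
  simp only [pvWBody, pvWinC]
  by_cases h7 : i ≤ 7
  · rw [if_pos h7]
    by_cases hc : 2 ≤ pvExisting P i c ∧ (pvMissing P i c).length = 1
    · rw [if_pos hc, PySem.Set.mem_update]; tauto
    · rw [if_neg hc]
      exact ⟨Or.inl, fun h => h.elim id fun ⟨_, hcc, _⟩ => absurd hcc hc⟩
  · rw [if_neg h7]
    exact ⟨Or.inl, fun h => h.elim id fun ⟨h7', _⟩ => absurd h7' h7⟩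

theorem nstep (P : List String) (t y : String) (s : PySem.Set String) (d : Int) :
    y ∈ pvNBody P t s d ↔ y ∈ s ∨
      ((1 ≤ pvVal t + d ∧ pvVal t + d ≤ 9) ∧ y = mkTileStr (pvVal t + d) (pvLast t)) := by
  simp only [pvNBody]
  split_ifs with h
  · rw [PySem.Set.mem_add]; tauto
  · exact ⟨Or.inl, fun hh => hh.elim id fun ⟨hc, _⟩ => absurd hc h⟩

def pvCA1 (P : List String) (y t : String) : Prop :=
  pvLast t ∈ (['m', 'p', 's'] : List Char) ∧
    ((∃ i ∈ PySem.List.pyRange (max 1 (pvVal t - 2)) (min 9 (pvVal t + 3)) 1, pvWinC P (pvLast t) y i)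
      ∨ pvPairC P t y)

theorem astep (P : List String) (y : String) (s : PySem.Set String) (t : String) :
    y ∈ pvABody P s t ↔ y ∈ s ∨ pvCA1 P y t := by
  simp only [pvABody, pvCA1]
  by_cases hm : pvLast t ∈ (['m', 'p', 's'] : List Char)
  · rw [if_pos hm]
    simp only [hm, true_and]
    have hw := pv_mem_foldl_iff (pvWBody P (pvLast t)) (pvWinC P (pvLast t) y) y
      (wstep P (pvLast t) y)
      (PySem.List.pyRange (max 1 (pvVal t - 2)) (min 9 (pvVal t + 3)) 1) s
    by_cases h2 : pvCnt P t = 2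
    · rw [if_pos h2, PySem.Set.mem_add, hw]
      simp only [pvPairC, h2, not_true, false_and, or_false, true_and, or_assoc]
    · rw [if_neg h2]
      by_cases h1 : pvCnt P t = 1
      · rw [if_pos h1]
        rw [pv_mem_foldl_iff (pvNBody P t) _ y (nstep P t y), hw]
        simp [pvPairC, h1, or_assoc]
      · rw [if_neg h1, hw]
        simp [pvPairC, h1, h2, or_assoc]
  · rw [if_neg hm]
    simp [hm]

theorem zstep (P : List String) (y : String) (s : PySem.Set String) (t : String) :
    y ∈ pvZBody P s t ↔ y ∈ s ∨
      (pvLast t = 'z' ∧ ((pvCnt P t = 2 ∧ y = t) ∨ (¬pvCnt P t = 2 ∧ pvCnt P t = 1 ∧ y = t))) := by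
  simp only [pvZBody]
  split_ifs with hz h2 h1
  · rw [PySem.Set.mem_add]; simp [hz, h2]
  · rw [PySem.Set.mem_add]; simp [hz, h1, h2]
  · simp [hz, h1, h2]
  · simp [hz]

theorem bstep (P : List String) (y : String) (s : PySem.Set String) (t : String) :
    y ∈ pvBBody P s t ↔ y ∈ s ∨
      ((pvLast t ∈ (['m', 'p', 's'] : List Char) ∧ pvPairC P t y) ∨
       (¬pvLast t ∈ (['m', 'p', 's'] : List Char) ∧ (pvLast t = 'z' ∧ pvCnt P t ≤ 2) ∧ y = t)) := by
  simp only [pvBBody]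
  by_cases hm : pvLast t ∈ (['m', 'p', 's'] : List Char)
  · rw [if_pos hm]
    simp only [hm, not_true, true_and, false_and, or_false]
    by_cases h2 : pvCnt P t = 2
    · rw [if_pos h2, PySem.Set.mem_add]
      simp only [pvPairC, h2, not_true, false_and, or_false, true_and, or_assoc]
    · rw [if_neg h2]
      by_cases h1 : pvCnt P t = 1
      · rw [if_pos h1]
        rw [pv_mem_foldl_iff (pvNBody P t) _ y (nstep P t y)]
        simp [pvPairC, h1, or_assoc]
      · rw [if_neg h1]
        simp [pvPairC, h1, h2]
  · rw [if_neg hm]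
    simp only [hm, not_false_iff, true_and, false_and, false_or]
    split_ifs with hzc
    · rw [PySem.Set.mem_add]
      simp [hzc]
    · simp [hzc]

theorem bwstep (P : List String) (c : Char) (y : String) (s : PySem.Set String) (i : Int) :
    y ∈ pvBWBody P c s i ↔ y ∈ s ∨ (pvHits P i c = 2 ∧ y ∈ pvMissing P i c) := by
  rw [pvBWBody]
  split_ifs with h
  · rw [PySem.Set.mem_update]; tauto
  · exact ⟨Or.inl, fun hh => hh.elim id fun ⟨hc, _⟩ => absurd hc h⟩

theorem mem_pvEffA (P : List String) (y : String) : y ∈ pvEffA P ↔ pvDesc P y := by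
  rw [pvEffA, pv_mem_foldl_iff (pvZBody P) _ y (zstep P y),
      pv_mem_foldl_iff (pvABody P) _ y (astep P y)]
  simp only [PySem.Set.empty, List.not_mem_nil, false_or]
  rw [pvDesc, ← crux P y]
  constructor
  · rintro (⟨t, ht, hm, hw | hp⟩ | ⟨t, ht, hcz⟩)
    · exact Or.inl ⟨t, ht, hm, by simpa [pvWinC] using hw⟩
    · exact Or.inr (Or.inl ⟨t, ht, hm, hp⟩)
    · obtain ⟨hz, hc⟩ := hcz
      have hpos := pvCnt_pos P t ((PySem.Set.mem_ofList P t).mp ht)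
      refine Or.inr (Or.inr ⟨t, ht, hz, hpos, ?_, ?_⟩)
      · rcases hc with ⟨h2, _⟩ | ⟨_, h1, _⟩ <;> omega
      · rcases hc with ⟨_, hy⟩ | ⟨_, _, hy⟩ <;> exact hy
  · rintro (⟨t, ht, hm, hw⟩ | ⟨t, ht, hm, hp⟩ | ⟨t, ht, hz, h1, h2, hy⟩)
    · exact Or.inl ⟨t, ht, hm, Or.inl (by simpa [pvWinC] using hw)⟩
    · exact Or.inl ⟨t, ht, hm, Or.inr hp⟩
    · refine Or.inr ⟨t, ht, hz, ?_⟩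
      by_cases h : pvCnt P t = 2
      · exact Or.inl ⟨h, hy⟩
      · exact Or.inr ⟨h, by omega, hy⟩

theorem mem_pvEffB (P : List String) (y : String) : y ∈ pvEffB P ↔ pvDesc P y := by
  rw [pvEffB, pv_mem_foldl_iff (pvBBody P) _ y (bstep P y),
      pv_mem_foldl_iff (fun res suit => (PySem.List.pyRange 1 8 1).foldl (pvBWBody P suit) res)
        (fun c => ∃ i ∈ PySem.List.pyRange 1 8 1, pvHits P i c = 2 ∧ y ∈ pvMissing P i c) y
        (fun s c => pv_mem_foldl_iff (pvBWBody P c) _ y (bwstep P c y) _ s)]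
  simp only [PySem.Set.empty, List.not_mem_nil, false_or]
  rw [pvDesc]
  constructor
  · rintro (⟨c, hc, hi⟩ | ⟨t, ht, ⟨hm, hp⟩ | ⟨hm, ⟨hz, hcnt⟩, hy⟩⟩)
    · exact Or.inl ⟨c, hc, hi⟩
    · exact Or.inr (Or.inl ⟨t, ht, hm, hp⟩)
    · exact Or.inr (Or.inr ⟨t, ht, hz,
        pvCnt_pos P t ((PySem.Set.mem_ofList P t).mp ht), hcnt, hy⟩)
  · rintro (⟨c, hc, hi⟩ | ⟨t, ht, hm, hp⟩ | ⟨t, ht, hz, h1, h2, hy⟩)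
    · exact Or.inl ⟨c, hc, hi⟩
    · exact Or.inr ⟨t, ht, Or.inl ⟨hm, hp⟩⟩
    · refine Or.inr ⟨t, ht, Or.inr ⟨?_, ⟨hz, h2⟩, hy⟩⟩
      rw [hz]; decide

theorem nodup_pvEffA (P : List String) : (pvEffA P).Nodup := by
  rw [pvEffA]
  refine pv_nodup_foldl _ ?_ _ _ (pv_nodup_foldl _ ?_ _ _ (by simp [PySem.Set.empty]))
  · intro s t hs
    rw [pvZBody]
    split_ifs with hz h2 h1
    · exact PySem.Set.nodup_add _ _ hs
    · exact PySem.Set.nodup_add _ _ hs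
    · exact hs
    · exact hs
  · intro s t hs
    simp only [pvABody]
    have hw : ∀ (l : List Int) (s0 : PySem.Set String), s0.Nodup →
        (l.foldl (pvWBody P (pvLast t)) s0).Nodup := by
      intro l s0 h0
      refine pv_nodup_foldl _ ?_ _ _ h0
      intro s' i hs'
      rw [pvWBody]
      split_ifs with a b
      · exact PySem.Set.nodup_update _ _ hs'
      · exact hs'
      · exact hs'
    have hn : ∀ (l : List Int) (s0 : PySem.Set String), s0.Nodup →
        (l.foldl (pvNBody P t) s0).Nodup := by
      intro l s0 h0
      refine pv_nodup_foldl _ ?_ _ _ h0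
      intro s' d hs'
      rw [pvNBody]
      split_ifs with a
      · exact PySem.Set.nodup_add _ _ hs'
      · exact hs'
    split_ifs with hm h2 h1
    · exact PySem.Set.nodup_add _ _ (hw _ _ hs)
    · exact hn _ _ (hw _ _ hs)
    · exact hw _ _ hs
    · exact hs

theorem nodup_pvEffB (P : List String) : (pvEffB P).Nodup := by
  rw [pvEffB]
  refine pv_nodup_foldl _ ?_ _ _ (pv_nodup_foldl _ ?_ _ _ (by simp [PySem.Set.empty]))
  · intro s t hs
    simp only [pvBBody]
    have hn : ∀ (l : List Int) (s0 : PySem.Set String), s0.Nodup →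
        (l.foldl (pvNBody P t) s0).Nodup := by
      intro l s0 h0
      refine pv_nodup_foldl _ ?_ _ _ h0
      intro s' d hs'
      rw [pvNBody]
      split_ifs with a
      · exact PySem.Set.nodup_add _ _ hs'
      · exact hs'
    split_ifs with hm h2 h1 hzc
    · exact PySem.Set.nodup_add _ _ hs
    · exact hn _ _ hs
    · exact hs
    · exact PySem.Set.nodup_add _ _ hs
    · exact hs
  · intro s c hs
    refine pv_nodup_foldl _ ?_ _ _ hs
    intro s' i hs'
    rw [pvBWBody]
    split_ifs with a
    · exact PySem.Set.nodup_update _ _ hs'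
    · exact hs'

theorem analyze_hand_eq (hand : List String) :
    analyze_hand hand =
      PySem.List.sorted (pvEffA (hand.map process_tile)) (fun x => x) false := rfl

theorem analyze_hand_alt_eq (hand : List String) :
    analyze_hand_alt hand =
      PySem.List.sorted (pvEffB (hand.map process_tile)) (fun x => x) false := rfl

-- ===== VERDICT (by name: the statement is the Claim_ definition above) =====
theorem analyze_hand_spec : Claim_equal_analyze_hand := by
  intro hand _ _
  unfold Spec_analyze_hand
  rw [analyze_hand_eq, analyze_hand_alt_eq]
  exact PySem.List.sorted_eq_sorted_of_perm _ _ _ (fun a b h => h)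
    ((List.perm_ext_iff_of_nodup (nodup_pvEffA _) (nodup_pvEffB _)).mpr
      (fun y => (mem_pvEffA _ y).trans (mem_pvEffB _ y).symm))
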